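-- pv_equiv track=rewrite | github.com/jocelyn-chang/university-ranking-system | univRanking.py | internationalRank
-- ===== SOURCE A (Python) =====
-- def internationalRank(info, selectedCountry):  # function finds the university with the best international rank in selected country
--     rank = 0
--     school = ""
--     for item in info:
--         if selectedCountry in item:
--             rank = int(item[0])  # sets beginning values to compare with other values later
--             school = item[1]
--             break
--     for item in info:
--         if selectedCountry in item:
--             if int(item[0]) < rank:
--                 rank = int(item[0])
--                 school = item[1]
--     line = f'At international rank => %d the university name is => %s\n' % (rank, school)
--     return line
-- ===== SOURCE B (Python) =====
-- def internationalRank(info, selectedCountry):  # sort-then-take-head instead of scanning for the minimum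
--     matches = sorted((item for item in info if selectedCountry in item),
--                      key=lambda x: int(x[0]))
--     if matches:
--         rank, school = int(matches[0][0]), matches[0][1]
--     else:
--         rank, school = 0, ""
--     line = f'At international rank => %d the university name is => %s\n' % (rank, school)
--     return line
-- ===== Notes on version B (the rewrite author's own statement) =====
-- stated objective: alternative
-- what changed: Replaces A's two linear scans (seed from the first match, then strict-minimize) with a stable sort of the matching rows by int(row[0]) and taking the head of the sorted list; stability preserves A's keep-first tie behaviour.
import Mathlib
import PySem

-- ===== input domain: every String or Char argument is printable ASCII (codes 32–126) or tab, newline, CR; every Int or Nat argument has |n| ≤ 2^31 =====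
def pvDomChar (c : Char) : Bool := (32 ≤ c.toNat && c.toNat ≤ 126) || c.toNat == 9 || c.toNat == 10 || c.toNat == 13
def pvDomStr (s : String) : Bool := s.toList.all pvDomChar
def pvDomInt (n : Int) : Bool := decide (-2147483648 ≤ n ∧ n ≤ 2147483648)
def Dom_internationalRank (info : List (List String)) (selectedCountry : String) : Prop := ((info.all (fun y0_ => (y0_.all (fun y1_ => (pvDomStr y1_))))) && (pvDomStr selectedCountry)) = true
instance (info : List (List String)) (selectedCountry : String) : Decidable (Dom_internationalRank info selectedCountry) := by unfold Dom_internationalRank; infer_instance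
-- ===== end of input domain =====

-- B replaces A's two linear scans by a stable sort of the matching rows keyed on int(row[0]),
-- returning the head of the sorted list (objective: alternative; sorting vs scanning).

-- shared helpers: int(item[0]) as a key, item[1], and the output format line
def pvKey (item : List String) : Int := (PySem.Int.ofStr? (PySem.List.pyGetD item 0 "")).getD 0

def pvSchool (item : List String) : String := PySem.List.pyGetD item 1 ""

def pvMatch (c : String) (item : List String) : Bool := item.contains c   -- selectedCountry in item

def pvFmt (rank : Int) (school : String) : String :=
  "At international rank => " ++ PySem.Int.toStr rank ++ " the university name is => " ++ school ++ "\n"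

-- ===== PORT A =====
-- first loop of A: break at the first matching row, seeding (rank, school); (0, "") if none
def pvSeed (info : List (List String)) (c : String) : Int × String :=
  match info with
  | [] => (0, "")
  | item :: rest => if pvMatch c item then (pvKey item, pvSchool item) else pvSeed rest c

def internationalRank (info : List (List String)) (selectedCountry : String) : String :=
  -- second loop of A: scan everything again, keeping strictly smaller ranks
  let r := info.foldl (fun (st : Int × String) item =>
      if pvMatch selectedCountry item then
        if pvKey item < st.1 then (pvKey item, pvSchool item) else st
      else st) (pvSeed info selectedCountry)
  pvFmt r.1 r.2

-- ===== PORT B =====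
def internationalRank_alt (info : List (List String)) (selectedCountry : String) : String :=
  -- sorted(matching rows, key=lambda x: int(x[0])): stable sort, then matches[0]
  let ms := PySem.List.sorted (info.filter (fun item => pvMatch selectedCountry item)) pvKey
  match ms with
  | [] => pvFmt 0 ""
  | best :: _ => pvFmt (pvKey best) (pvSchool best)

-- ===== PRECONDITION & SPEC =====
-- Pre_ excludes inputs where some matching row has a non-int first field or fewer than two fields:
-- on those A raises ValueError/IndexError, except for a rare short row that never becomes the running
-- minimum, where A still returns and B agrees anyway (see claim cites).
def Pre_internationalRank (info : List (List String)) (selectedCountry : String) : Prop :=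
  ∀ item ∈ info, pvMatch selectedCountry item = true →
    2 ≤ item.length ∧ (PySem.Int.ofStr? (PySem.List.pyGetD item 0 "")).isSome = true
instance (info : List (List String)) (selectedCountry : String) : Decidable (Pre_internationalRank info selectedCountry) := by unfold Pre_internationalRank; infer_instance

def pvWitness_internationalRank : List (List String) × String := ([["1", "X", "US"]], "US")

def Spec_internationalRank (info : List (List String)) (selectedCountry : String) (out : String) : Prop := out = internationalRank_alt info selectedCountry
instance (info : List (List String)) (selectedCountry : String) (out : String) : Decidable (Spec_internationalRank info selectedCountry out) := by unfold Spec_internationalRank; infer_instance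

-- ===== CLAIM (what is proved, stated in full; the proofs are below) =====
def Claim_equal_internationalRank : Prop := ∀ (info : List (List String)) (selectedCountry : String), Dom_internationalRank info selectedCountry → Pre_internationalRank info selectedCountry → Spec_internationalRank info selectedCountry (internationalRank info selectedCountry)

-- ===== LEMMAS AND PROOFS =====

-- A's first loop returns (0,"") or the key/school of the first matching row
theorem pvSeed_eq_filter (info : List (List String)) (c : String) :
    pvSeed info c = (match info.filter (fun item => pvMatch c item) with
      | [] => ((0 : Int), "")
      | m :: _ => (pvKey m, pvSchool m)) := by
  induction info with
  | nil => rfl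
  | cons item rest ih =>
    by_cases h : pvMatch c item = true
    · simp [pvSeed, h]
    · simp [pvSeed, h, ih]

-- A's second loop only acts on matching rows: it is a fold over the filtered list
theorem pvFold_eq_filter (info : List (List String)) (c : String) (s : Int × String) :
    info.foldl (fun (st : Int × String) item =>
        if pvMatch c item then
          if pvKey item < st.1 then (pvKey item, pvSchool item) else st
        else st) s
      = (info.filter (fun item => pvMatch c item)).foldl
          (fun (st : Int × String) item =>
            if pvKey item < st.1 then (pvKey item, pvSchool item) else st) s := by
  induction info generalizing s with
  | nil => rfl
  | cons item rest ih =>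
    by_cases h : pvMatch c item = true
    · simp [List.foldl_cons, h, ih]
    · simp [List.foldl_cons, h, ih]

-- the pair-valued strict-min fold is the image of the row-valued first-min fold
theorem pvFold_pair (t : List (List String)) (m : List String) :
    t.foldl (fun (st : Int × String) item =>
        if pvKey item < st.1 then (pvKey item, pvSchool item) else st) (pvKey m, pvSchool m)
      = (fun b => (pvKey b, pvSchool b))
          (t.foldl (fun b item => if pvKey item < pvKey b then item else b) m) := by
  induction t generalizing m with
  | nil => rfl
  | cons x rest ih =>
    by_cases h : pvKey x < pvKey m
    · simp [List.foldl_cons, h, ih]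
    · simp [List.foldl_cons, h, ih]

-- inserting into a stable-sorted accumulator updates the head exactly like one first-min step
theorem pvHead_insertBy (x : List String) (acc : List (List String)) :
    (PySem.List.insertBy (fun a b => decide (pvKey a < pvKey b)) x acc).head?
      = (match acc.head? with
         | none => some x
         | some m => if pvKey x < pvKey m then some x else some m) := by
  cases acc with
  | nil => rfl
  | cons y ys =>
    by_cases h : pvKey x < pvKey y
    · simp [PySem.List.insertBy, h]
    · simp [PySem.List.insertBy, h]

-- the head of the insertion-sort fold is the first-min fold (stability at the head)
theorem pvHead_foldl_insertBy (xs : List (List String)) (acc : List (List String)) :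
    (xs.foldl (fun acc x => PySem.List.insertBy (fun a b => decide (pvKey a < pvKey b)) x acc) acc).head?
      = xs.foldl (fun acc x =>
          match acc with
          | none => some x
          | some m => if pvKey x < pvKey m then some x else some m) acc.head? := by
  induction xs generalizing acc with
  | nil => rfl
  | cons x rest ih => simp [List.foldl_cons, ih, pvHead_insertBy]

-- PySem.List.min? is literally that fold (its match compiles to a different matcher term)
theorem pvMin?_eq_foldl (xs : List (List String)) :
    PySem.List.min? xs pvKey
      = xs.foldl (fun acc x =>
          match acc with
          | none => some x
          | some m => if pvKey x < pvKey m then some x else some m) none := by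
  show List.foldl _ none xs = _
  congr 1
  funext acc x
  cases acc <;> rfl

-- the head of the stable sort of xs is Python's min(xs, key) (the FIRST minimum)
theorem pvHead_sorted (xs : List (List String))  :
    (PySem.List.sorted xs pvKey).head? = PySem.List.min? xs pvKey := by
  rw [PySem.List.sorted_eq_foldl_insertBy, pvHead_foldl_insertBy xs [], pvMin?_eq_foldl]
  rfl


-- min? on a nonempty list is the first-min fold from the head
theorem pvMin?_cons (m : List String) (t : List (List String)) :
    PySem.List.min? (m :: t) pvKey
      = some (t.foldl (fun b item => if pvKey item < pvKey b then item else b) m) := by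
  show List.foldl _ (some m) t = _
  induction t generalizing m with
  | nil => rfl
  | cons x rest ih =>
    by_cases h : pvKey x < pvKey m
    · simp [List.foldl_cons, h, ih]
    · simp [List.foldl_cons, h, ih]

-- ===== VERDICT (by name: the statement is the Claim_ definition above) =====
theorem internationalRank_spec : Claim_equal_internationalRank := by
  intro info c _ _
  show internationalRank info c = internationalRank_alt info c
  simp only [internationalRank, internationalRank_alt]
  rw [pvFold_eq_filter, pvSeed_eq_filter]
  cases hf : info.filter (fun item => pvMatch c item) with
  | nil =>
    rfl
  | cons m t =>
    have hh : (PySem.List.sorted (m :: t) pvKey).head?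
        = some (t.foldl (fun b item => if pvKey item < pvKey b then item else b) m) := by
      rw [pvHead_sorted, pvMin?_cons]
    cases hs : PySem.List.sorted (m :: t) pvKey with
    | nil => simp [hs] at hh
    | cons best rest =>
      rw [hs] at hh
      simp only [List.head?_cons, Option.some.injEq] at hh
      simp [pvFold_pair, hh]
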